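-- pv_equiv track=rewrite | github.com/sys-ryan/algorithm-test | 0630/13397.py | go
-- ===== SOURCE A (Python) =====
-- def go(a, mid):
--   n = len(a)
--   t1 = a[0]
--   t2 = a[0]
--   ans = 1
--
--   for i in range(1, n):
--     if t1 > a[i]:
--       t1 = a[i]
--     if t2 < a[i]:
--       t2 = a[i]
--     if t2 - t1 > mid:
--       ans += 1
--       t1 = a[i]
--       t2 = a[i]
--   return ans
-- ===== SOURCE B (Python) =====
-- def go(a, mid):
--   ans = 1
--   start = 0
--   for i in range(1, len(a)):
--     seg = a[start:i+1]
--     if max(seg) - min(seg) > mid: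
--       ans += 1
--       start = i
--   return ans
-- ===== Notes on version B (the rewrite author's own statement) =====
-- stated objective: alternative
-- what changed: B tracks only the start index of the current segment and rescans a[start:i+1] with built-in max()/min() at each step, instead of A's running min/max registers that are reset on a split.
-- crash fix: On the empty list A raises IndexError (it reads a[0] up front) while B's loop never runs and it returns 1. — e.g. on go([], 0): A raises IndexError, B returns 1
import Mathlib
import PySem

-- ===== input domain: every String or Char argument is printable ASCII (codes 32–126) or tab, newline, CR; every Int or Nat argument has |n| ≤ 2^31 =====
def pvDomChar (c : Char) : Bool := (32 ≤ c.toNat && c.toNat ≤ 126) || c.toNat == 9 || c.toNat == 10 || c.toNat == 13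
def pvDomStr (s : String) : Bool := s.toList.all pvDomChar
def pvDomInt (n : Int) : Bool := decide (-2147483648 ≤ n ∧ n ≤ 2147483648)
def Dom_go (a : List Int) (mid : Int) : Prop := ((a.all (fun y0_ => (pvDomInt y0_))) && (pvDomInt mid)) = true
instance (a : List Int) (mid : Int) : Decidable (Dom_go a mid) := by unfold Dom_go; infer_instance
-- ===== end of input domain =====

-- B keeps only the start index of the current segment and rescans a[start:i+1] with max()/min(),
-- instead of A's running min/max registers (objective: alternative decomposition).

-- ===== PORT A =====
-- loop body of A: running min t1, running max t2, counter ans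
def stepA (a : List Int) (mid : Int) (s : Int × Int × Int) (i : Int) : Int × Int × Int :=
  let ai := PySem.List.pyGetD a i 0
  let t1 := if s.1 > ai then ai else s.1
  let t2 := if s.2.1 < ai then ai else s.2.1
  if t2 - t1 > mid then (ai, ai, s.2.2 + 1) else (t1, t2, s.2.2)

def go (a : List Int) (mid : Int) : Int :=
  match a with
  | [] => 0  -- Python raises IndexError at a[0]; excluded by Pre_go
  | x :: _ =>
    ((PySem.List.pyRange 1 (a.length : Int) 1).foldl (stepA a mid) (x, x, 1)).2.2

-- ===== PORT B =====
-- loop body of B: state (start, ans); rescan a[start:i+1]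
def stepB (a : List Int) (mid : Int) (s : Int × Int) (i : Int) : Int × Int :=
  let seg := PySem.List.slice a (some s.1) (some (i + 1))
  let mx := (PySem.List.max? seg (fun y => y)).getD 0
  let mn := (PySem.List.min? seg (fun y => y)).getD 0
  if mx - mn > mid then (i, s.2 + 1) else (s.1, s.2)

def go_alt (a : List Int) (mid : Int) : Int :=
  ((PySem.List.pyRange 1 (a.length : Int) 1).foldl (stepB a mid) (0, 1)).2

-- ===== PRECONDITION & SPEC =====
-- Pre_go excludes only the empty list, on which Python A raises IndexError at a[0].
def Pre_go (a : List Int) (mid : Int) : Prop := a ≠ []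
instance (a : List Int) (mid : Int) : Decidable (Pre_go a mid) := by unfold Pre_go; infer_instance
def pvWitness_go : List Int × Int := ([3, 1, 7, 2], 4)

-- On the empty list A raises IndexError (it reads a[0] up front) while B's loop never runs and it returns 1.
def Raises_go (a : List Int) (mid : Int) : Prop := a = []
instance (a : List Int) (mid : Int) : Decidable (Raises_go a mid) := by unfold Raises_go; infer_instance
def pvRaiseWitness_go : List Int × Int := ([], 0)
def pvRaiseWitnessOut_go : Int := 1

def Spec_go (a : List Int) (mid : Int) (out : Int) : Prop := out = go_alt a mid
instance (a : List Int) (mid : Int) (out : Int) : Decidable (Spec_go a mid out) := by unfold Spec_go; infer_instance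

-- ===== CLAIM (what is proved, stated in full; the proofs are below) =====
def Claim_equal_go : Prop := ∀ (a : List Int) (mid : Int), Dom_go a mid → Pre_go a mid → Spec_go a mid (go a mid)
def Claim_raises_go : Prop := (∀ (a : List Int) (mid : Int), Dom_go a mid → Raises_go a mid → ¬ Pre_go a mid) ∧ (Dom_go (pvRaiseWitness_go.1) (pvRaiseWitness_go.2) ∧ Raises_go (pvRaiseWitness_go.1) (pvRaiseWitness_go.2) ∧ go_alt (pvRaiseWitness_go.1) (pvRaiseWitness_go.2) = pvRaiseWitnessOut_go)

-- ===== LEMMAS AND PROOFS =====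

-- the invariant relating the two folds after processing indices 1..k
theorem go_inv (a : List Int) (mid x : Int) (tl : List Int) (ha : a = x :: tl) :
    ∀ k : Nat, k + 1 ≤ a.length →
    ∃ st : Nat, st ≤ k ∧
      ((PySem.List.pyRange 1 ((k : Int) + 1) 1).foldl (stepB a mid) (0, 1)).1 = (st : Int) ∧
      ((PySem.List.pyRange 1 ((k : Int) + 1) 1).foldl (stepB a mid) (0, 1)).2 =
        ((PySem.List.pyRange 1 ((k : Int) + 1) 1).foldl (stepA a mid) (x, x, 1)).2.2 ∧
      (PySem.List.min? ((a.drop st).take (k + 1 - st)) (fun y => y)) =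
        some ((PySem.List.pyRange 1 ((k : Int) + 1) 1).foldl (stepA a mid) (x, x, 1)).1 ∧
      (PySem.List.max? ((a.drop st).take (k + 1 - st)) (fun y => y)) =
        some ((PySem.List.pyRange 1 ((k : Int) + 1) 1).foldl (stepA a mid) (x, x, 1)).2.1 := by

  intro k
  induction k with
  | zero =>
    intro _
    refine ⟨0, le_refl _, ?_⟩
    rw [PySem.List.pyRange_one_eq_nil (by omega)]
    subst ha
    simp [PySem.List.min?_id_cons, PySem.List.max?_id_cons]
  | succ k ih =>
    intro h
    obtain ⟨st, hst, hB1, hB2, hmin, hmax⟩ := ih (by omega)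
    have hk1 : k + 1 < a.length := by omega
    have hr : PySem.List.pyRange 1 (((k + 1 : Nat) : Int) + 1) 1
        = PySem.List.pyRange 1 ((k : Int) + 1) 1 ++ [(k : Int) + 1] := by
      have h1 : (((k + 1 : Nat) : Int) + 1) = ((k : Int) + 1) + 1 := by push_cast; ring
      rw [h1, PySem.List.pyRange_one_succ_right (by omega)]
    set sA := (PySem.List.pyRange 1 ((k : Int) + 1) 1).foldl (stepA a mid) (x, x, 1) with hsA
    set sB := (PySem.List.pyRange 1 ((k : Int) + 1) 1).foldl (stepB a mid) (0, 1) with hsB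
    have hai : PySem.List.pyGetD a ((k : Int) + 1) 0 = a[k + 1] := by
      rw [PySem.List.pyGetD_eq_getElem a 0 (by omega) (by exact_mod_cast hk1)]
      have h0 : ((k : Int) + 1).toNat = k + 1 := by omega
      congr 1
    have hseglen : 0 < ((a.drop st).take (k + 1 - st)).length := by
      simp [List.length_take, List.length_drop]
      omega
    obtain ⟨y, t, hseg⟩ : ∃ y t, (a.drop st).take (k + 1 - st) = y :: t := by
      rcases hc : (a.drop st).take (k + 1 - st) with _ | ⟨y, t⟩
      · rw [hc] at hseglen; simp at hseglen
      · exact ⟨y, t, rfl⟩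
    rw [hseg, PySem.List.min?_id_cons] at hmin
    rw [hseg, PySem.List.max?_id_cons] at hmax
    have hmn : List.foldl min y t = sA.1 := Option.some.inj hmin
    have hmx : List.foldl max y t = sA.2.1 := Option.some.inj hmax
    have hext : (a.drop st).take (k + 1 + 1 - st) = (y :: t) ++ [a[k + 1]] := by
      have h2 : k + 1 + 1 - st = (k + 1 - st) + 1 := by omega
      rw [h2, List.take_succ, hseg]
      have h3 : (a.drop st)[k + 1 - st]? = a[k + 1]? := by
        rw [List.getElem?_drop]
        congr 1
        omega
      rw [h3, List.getElem?_eq_getElem hk1]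
      rfl
    have hslice : PySem.List.slice a (some sB.1) (some ((k : Int) + 1 + 1))
        = (y :: t) ++ [a[k + 1]] := by
      rw [hB1]
      have h4 : ((k : Int) + 1 + 1) = ((k + 2 : Nat) : Int) := by push_cast; ring
      rw [h4, PySem.List.slice_natCast]
      have h5 : k + 2 - st = k + 1 + 1 - st := by omega
      rw [h5, hext]
    have hmin' : PySem.List.min? ((y :: t) ++ [a[k + 1]]) (fun y => y)
        = some (min sA.1 a[k + 1]) := by
      rw [List.cons_append, PySem.List.min?_id_cons, List.foldl_append]
      simp [hmn]
    have hmax' : PySem.List.max? ((y :: t) ++ [a[k + 1]]) (fun y => y)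
        = some (max sA.2.1 a[k + 1]) := by
      rw [List.cons_append, PySem.List.max?_id_cons, List.foldl_append]
      simp [hmx]
    have hminif : min sA.1 a[k + 1] = if sA.1 > a[k + 1] then a[k + 1] else sA.1 := by
      split_ifs <;> omega
    have hmaxif : max sA.2.1 a[k + 1] = if sA.2.1 < a[k + 1] then a[k + 1] else sA.2.1 := by
      split_ifs <;> omega
    rw [hr]
    simp only [List.foldl_append, List.foldl_cons, List.foldl_nil, ← hsA, ← hsB]
    simp only [stepA, stepB, hai, hslice, hmin', hmax', Option.getD_some, hminif, hmaxif]
    by_cases hc : (if sA.2.1 < a[k + 1] then a[k + 1] else sA.2.1)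
        - (if sA.1 > a[k + 1] then a[k + 1] else sA.1) > mid
    · refine ⟨k + 1, le_refl _, ?_, ?_, ?_, ?_⟩ <;> simp only [if_pos hc]
      · push_cast; ring
      · exact hB2 ▸ rfl
      · have h6 : k + 1 + 1 - (k + 1) = 1 := by omega
        have h7 : List.take 1 (List.drop (k + 1) a) = [a[k + 1]] := by
          rw [List.drop_eq_getElem_cons hk1]
          rfl
        rw [h6, h7, PySem.List.min?_id_cons]
        rfl
      · have h6 : k + 1 + 1 - (k + 1) = 1 := by omega
        have h7 : List.take 1 (List.drop (k + 1) a) = [a[k + 1]] := by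
          rw [List.drop_eq_getElem_cons hk1]
          rfl
        rw [h6, h7, PySem.List.max?_id_cons]
        rfl
    · refine ⟨st, by omega, ?_, ?_, ?_, ?_⟩ <;> simp only [if_neg hc]
      · exact hB1
      · exact hB2
      · rw [hext, hmin', hminif]
      · rw [hext, hmax', hmaxif]

theorem go_spec : Claim_equal_go := by
  intro a mid _ hpre
  unfold Spec_go
  cases a with
  | nil => exact absurd rfl hpre
  | cons x tl =>
    obtain ⟨st, _, _, hB2, _, _⟩ :=
      go_inv (x :: tl) mid x tl rfl tl.length (by simp)
    simp only [go, go_alt]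
    have hlen : (((x :: tl).length : Nat) : Int) = ((tl.length : Nat) : Int) + 1 := by
      simp
    rw [hlen]
    exact hB2.symm

theorem go_raises : Claim_raises_go := by
  unfold Claim_raises_go
  exact ⟨fun a mid _ hr hp => hp hr, by decide⟩

-- self-check: the crash-fix witness value, read off go_raises
theorem go_raises_witness : go_alt pvRaiseWitness_go.1 pvRaiseWitness_go.2 = pvRaiseWitnessOut_go :=
  go_raises.2.2.2
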